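-- pv_equiv track=rewrite | github.com/20q2/mtgenesis.ai | proxy-server/app.py | smart_split_by_periods
-- ===== SOURCE A (Python) =====
-- def smart_split_by_periods(text):
--     """
--     Split text by periods, but respect quoted sections.
--     Periods inside quotes should not cause splits.
--     """
--     if not text:
--         return []
--
--     parts = []
--     current_part = ""
--     in_quotes = False
--     quote_char = None
--
--     i = 0
--     while i < len(text):
--         char = text[i]
--
--         # Handle quote characters
--         if char in ['"', "'"]:
--             if not in_quotes:
--                 # Starting a quote
--                 in_quotes = True
--                 quote_char = char
--             elif char == quote_char:
--                 # Ending the quote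
--                 in_quotes = False
--                 quote_char = None
--
--         # Handle periods
--         elif char == '.' and not in_quotes:
--             # Period outside quotes - this is a split point
--             current_part += char
--             if current_part.strip():
--                 parts.append(current_part.strip())
--             current_part = ""
--             i += 1
--             continue
--
--         current_part += char
--         i += 1
--
--     # Add any remaining part
--     if current_part.strip():
--         parts.append(current_part.strip())
--
--     return parts
-- ===== SOURCE B (Python) =====
-- def smart_split_by_periods(text):
--     # Pass 1: record the cut position after every period seen outside quotes.
--     cuts = [0]
--     in_quotes = False
--     quote_char = None
--     for i, char in enumerate(text):
--         if char in ('"', "'"):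
--             if not in_quotes:
--                 in_quotes = True
--                 quote_char = char
--             elif char == quote_char:
--                 in_quotes = False
--                 quote_char = None
--         elif char == '.' and not in_quotes:
--             cuts.append(i + 1)
--     cuts.append(len(text))
--     # Pass 2: slice between consecutive cuts, strip, keep the non-empty pieces.
--     return [seg for seg in (text[a:b].strip() for a, b in zip(cuts, cuts[1:])) if seg]
-- ===== Notes on version B (the rewrite author's own statement) =====
-- stated objective: faster
-- what changed: A's interleaved accumulate-strip-flush scan with repeated string concatenation is replaced by two passes: a quote-tracking pass that only records cut indices after each unquoted period, then a slicing pass that strips and filters the segments between consecutive cuts.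
import Mathlib
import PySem

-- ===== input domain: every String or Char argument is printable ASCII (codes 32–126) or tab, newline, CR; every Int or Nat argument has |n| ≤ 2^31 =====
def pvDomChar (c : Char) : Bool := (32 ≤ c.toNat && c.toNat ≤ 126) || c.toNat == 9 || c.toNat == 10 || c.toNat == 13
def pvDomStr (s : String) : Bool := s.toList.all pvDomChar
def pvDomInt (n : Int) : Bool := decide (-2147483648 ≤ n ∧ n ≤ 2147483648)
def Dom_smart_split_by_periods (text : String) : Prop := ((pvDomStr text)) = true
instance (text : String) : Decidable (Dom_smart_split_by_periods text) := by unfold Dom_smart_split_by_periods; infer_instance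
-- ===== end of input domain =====

-- B replaces A's interleaved accumulate/strip/flush scan by an index-recording pass plus a slicing pass (alternative decomposition, same behaviour).

-- ===== PORT A =====
-- A's while-loop: state (parts, current_part, in_quotes, quote_char); current_part kept as List Char.
def pvLoopA : List Char → List String → List Char → Bool → Option Char → List String
  | [], parts, cur, _, _ =>
      if PySem.Chars.strip cur ≠ [] then parts ++ [String.ofList (PySem.Chars.strip cur)] else parts
  | c :: cs, parts, cur, inq, qc =>
      if c = '"' ∨ c = '\'' then
        if ¬ inq then pvLoopA cs parts (cur ++ [c]) true (some c)
        else if some c = qc then pvLoopA cs parts (cur ++ [c]) false none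
        else pvLoopA cs parts (cur ++ [c]) inq qc
      else if c = '.' ∧ inq = false then
        let cur' := cur ++ [c]
        pvLoopA cs
          (if PySem.Chars.strip cur' ≠ [] then parts ++ [String.ofList (PySem.Chars.strip cur')] else parts)
          [] inq qc
      else pvLoopA cs parts (cur ++ [c]) inq qc

def smart_split_by_periods (text : String) : List String :=
  if text = "" then [] else pvLoopA text.toList [] [] false none

-- ===== PORT B =====
-- pass 1 of Source B: walk enumerate(text) recording i+1 after every unquoted period.
def pvCutsLoop : List Char → Nat → Bool → Option Char → List Nat
  | [], _, _, _ => []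
  | c :: cs, i, inq, qc =>
      if c = '"' ∨ c = '\'' then
        if ¬ inq then pvCutsLoop cs (i + 1) true (some c)
        else if some c = qc then pvCutsLoop cs (i + 1) false none
        else pvCutsLoop cs (i + 1) inq qc
      else if c = '.' ∧ inq = false then (i + 1) :: pvCutsLoop cs (i + 1) inq qc
      else pvCutsLoop cs (i + 1) inq qc

def smart_split_by_periods_alt (text : String) : List String :=
  let chars := text.toList
  let cuts : List Nat := 0 :: (pvCutsLoop chars 0 false none ++ [chars.length])
  -- text[a:b] with 0 ≤ a ≤ b ≤ len: exact as drop/take (PySem.List.slice_natCast)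
  (((cuts.zip cuts.tail).map
      (fun p => PySem.Chars.strip ((chars.drop p.1).take (p.2 - p.1)))).filter
      (· ≠ [])).map String.ofList

-- ===== PRECONDITION & SPEC =====
def Spec_smart_split_by_periods (text : String) (out : List String) : Prop := out = smart_split_by_periods_alt text
instance (text : String) (out : List String) : Decidable (Spec_smart_split_by_periods text out) := by unfold Spec_smart_split_by_periods; infer_instance

-- ===== CLAIM (what is proved, stated in full; the proofs are below) =====
def Claim_equal_smart_split_by_periods : Prop := ∀ (text : String), Dom_smart_split_by_periods text → Spec_smart_split_by_periods text (smart_split_by_periods text)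

-- ===== LEMMAS AND PROOFS =====

-- shared intermediate: (first raw segment, remaining raw segments)
def pvRawSegs : List Char → Bool → Option Char → List Char × List (List Char)
  | [], _, _ => ([], [])
  | c :: cs, inq, qc =>
      if c = '"' ∨ c = '\'' then
        let s : Bool × Option Char :=
          if ¬ inq then (true, some c) else if some c = qc then (false, none) else (inq, qc)
        let r := pvRawSegs cs s.1 s.2
        (c :: r.1, r.2)
      else if c = '.' ∧ inq = false then
        let r := pvRawSegs cs inq qc
        ([c], r.1 :: r.2)
      else
        let r := pvRawSegs cs inq qc
        (c :: r.1, r.2)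

def pvEmit (segs : List (List Char)) : List String :=
  ((segs.map PySem.Chars.strip).filter (· ≠ [])).map String.ofList

theorem pvLoopA_eq (cs : List Char) : ∀ (parts : List String) (cur : List Char) (inq : Bool) (qc : Option Char),
    pvLoopA cs parts cur inq qc =
      parts ++ pvEmit ((cur ++ (pvRawSegs cs inq qc).1) :: (pvRawSegs cs inq qc).2) := by
  induction cs with
  | nil =>
      intro parts cur inq qc
      simp [pvLoopA, pvRawSegs, pvEmit]
      split <;> simp_all
  | cons c cs ih =>
      intro parts cur inq qc
      by_cases hq : c = '"' ∨ c = '\''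
      · by_cases hin : inq
        · by_cases hqc : some c = qc
          · simp [pvLoopA, pvRawSegs, hq, hin, hqc, ih, List.append_assoc]
          · simp [pvLoopA, pvRawSegs, hq, hin, hqc, ih, List.append_assoc]
        · simp [pvLoopA, pvRawSegs, hq, hin, ih, List.append_assoc]
      · by_cases hp : c = '.' ∧ inq = false
        · obtain ⟨hc, hf⟩ := hp; subst hc; subst hf
          simp only [pvLoopA, pvRawSegs, hq, if_true, and_self, if_false, ih, pvEmit,
            List.map_cons, List.filter_cons]
          by_cases hs : PySem.Chars.strip (cur ++ ['.']) = [] <;>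
            simp [hs, List.append_assoc]
        · simp [pvLoopA, pvRawSegs, hq, hp, ih, List.append_assoc]

-- every cut recorded from position i onwards is > i and ≤ i + length
theorem pvCutsLoop_bounds (cs : List Char) : ∀ (i : Nat) (inq : Bool) (qc : Option Char),
    ∀ k ∈ pvCutsLoop cs i inq qc, i < k ∧ k ≤ i + cs.length := by
  induction cs with
  | nil => intro i inq qc k hk; simp [pvCutsLoop] at hk
  | cons c cs ih =>
      intro i inq qc k hk
      simp only [pvCutsLoop] at hk
      split at hk
      · split at hk
        · have := ih (i+1) _ _ k hk; simp only [List.length_cons]; omega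
        · split at hk
          · have := ih (i+1) _ _ k hk; simp only [List.length_cons]; omega
          · have := ih (i+1) _ _ k hk; simp only [List.length_cons]; omega
      · split at hk
        · rcases List.mem_cons.1 hk with h | h
          · subst h; simp only [List.length_cons]; omega
          · have := ih (i+1) _ _ k h; simp only [List.length_cons]; omega
        · have := ih (i+1) _ _ k hk; simp only [List.length_cons]; omega

def pvSegsOf (chars : List Char) (cuts : List Nat) : List (List Char) :=
  (cuts.zip cuts.tail).map (fun p => (chars.drop p.1).take (p.2 - p.1))

theorem pvSegsOf_cons (chars : List Char) (a b : Nat) (ls : List Nat) :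
    pvSegsOf chars (a :: b :: ls) = (chars.drop a).take (b - a) :: pvSegsOf chars (b :: ls) := rfl

theorem pvDrop_succ_of_cons {chars : List Char} {c : Char} {cs : List Char} {j : Nat}
    (h : chars.drop j = c :: cs) : chars.drop (j+1) = cs := by
  have h2 : chars.drop (j+1) = (chars.drop j).drop 1 := by rw [List.drop_drop]
  rw [h2, h]; rfl

-- one non-splitting character: prepend it to the head segment
theorem pvStep (chars : List Char) (c : Char) (j : Nat) (cl : List Nat)
    (R : List Char × List (List Char))
    (hd : chars.drop j = c :: chars.drop (j+1))
    (hb : ∀ k ∈ cl, j + 1 < k) (hL : j < chars.length)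
    (hih : pvSegsOf chars ((j+1) :: (cl ++ [chars.length])) = R.1 :: R.2) :
    pvSegsOf chars (j :: (cl ++ [chars.length])) = (c :: R.1) :: R.2 := by
  rcases hcl : cl ++ [chars.length] with _ | ⟨k, ks⟩
  · simp at hcl
  · have hk : j + 1 ≤ k := by
      cases cl with
      | nil => simp at hcl; omega
      | cons a t => simp at hcl; have := hb a (by simp); omega
    rw [hcl, pvSegsOf_cons] at hih
    rw [pvSegsOf_cons]
    simp only [List.cons.injEq] at hih
    obtain ⟨h1, h2⟩ := hih
    rw [h2, hd]
    have hkj : k - j = (k - (j+1)) + 1 := by omega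
    rw [hkj, List.take_succ_cons, h1]

theorem pvSegs_eq (cs : List Char) : ∀ (j : Nat) (inq : Bool) (qc : Option Char) (chars : List Char),
    chars.drop j = cs → j + cs.length = chars.length →
    pvSegsOf chars (j :: (pvCutsLoop cs j inq qc ++ [chars.length]))
      = (pvRawSegs cs inq qc).1 :: (pvRawSegs cs inq qc).2 := by
  induction cs with
  | nil =>
      intro j inq qc chars hdrop hlen
      simp [pvCutsLoop, pvSegsOf, pvRawSegs, hdrop, ← hlen]
  | cons c cs ih =>
      intro j inq qc chars hdrop hlen
      have hdrop1 : chars.drop (j+1) = cs := pvDrop_succ_of_cons hdrop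
      have hd : chars.drop j = c :: chars.drop (j+1) := by rw [hdrop1]; exact hdrop
      have hlen1 : (j+1) + cs.length = chars.length := by simp at hlen; omega
      have hL : j < chars.length := by simp at hlen; omega
      have hb : ∀ (inq' : Bool) (qc' : Option Char), ∀ k ∈ pvCutsLoop cs (j+1) inq' qc', j + 1 < k :=
        fun inq' qc' k hk => (pvCutsLoop_bounds cs (j+1) inq' qc' k hk).1
      by_cases hq : c = '"' ∨ c = '\''
      · cases inq with
        | false =>
            simp [pvCutsLoop, pvRawSegs, hq]
            exact pvStep chars c j _ _ hd (hb _ _) hL (ih (j+1) true (some c) chars hdrop1 hlen1)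
        | true =>
            by_cases hqc : some c = qc
            · simp only [pvCutsLoop, pvRawSegs, hq, if_true, hqc]
              exact pvStep chars c j _ _ hd (hb _ _) hL (ih (j+1) false none chars hdrop1 hlen1)
            · simp [pvCutsLoop, pvRawSegs, hq, hqc]
              exact pvStep chars c j _ _ hd (hb _ _) hL (ih (j+1) true qc chars hdrop1 hlen1)
      · by_cases hp : c = '.' ∧ inq = false
        · obtain ⟨hc, hf⟩ := hp; subst hc; subst hf
          simp only [pvCutsLoop, pvRawSegs, hq, if_false, and_self, if_true]
          simp only [List.cons_append, pvSegsOf_cons]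
          rw [ih (j+1) false qc chars hdrop1 hlen1]
          have h1 : (chars.drop j).take ((j+1) - j) = ['.'] := by
            rw [hd]; simp
          simp only [Nat.add_sub_cancel_left] at h1
          simp [h1]
        · simp only [pvCutsLoop, pvRawSegs, hq, hp, if_false]
          exact pvStep chars c j _ _ hd (hb _ _) hL (ih (j+1) inq qc chars hdrop1 hlen1)

-- ===== VERDICT (by name: the statement is the Claim_ definition above) =====
theorem smart_split_by_periods_spec : Claim_equal_smart_split_by_periods := by
  intro text _
  unfold Spec_smart_split_by_periods smart_split_by_periods smart_split_by_periods_alt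
  have halt : ∀ (chars : List Char),
      (((((0 :: (pvCutsLoop chars 0 false none ++ [chars.length])).zip
          (0 :: (pvCutsLoop chars 0 false none ++ [chars.length])).tail).map
          (fun p => PySem.Chars.strip ((chars.drop p.1).take (p.2 - p.1)))).filter
          (· ≠ [])).map String.ofList)
        = pvEmit (pvSegsOf chars (0 :: (pvCutsLoop chars 0 false none ++ [chars.length]))) := by
    intro chars
    simp [pvEmit, pvSegsOf, List.map_map, Function.comp_def]
  by_cases ht : text = ""
  · subst ht
    simp [pvCutsLoop]
    decide
  · have hne := ht
    simp only [hne, if_false, halt]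
    rw [pvSegs_eq text.toList 0 false none text.toList (by simp) (by simp)]
    rw [pvLoopA_eq]
    simp
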